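-- pv_equiv track=rewrite | github.com/13sachin/aqtivate_tn_hackathon | qft_encoding.py | encode_position
-- ===== SOURCE A (Python) =====
-- def encode_position(row, col):
--     # Start with an empty bit string
--     bits = []
--
--     # First bit: 0 for left 8x4 submatrix, 1 for right 8x4 submatrix
--     bits.append((col >> 2) & 1)
--
--     # Second bit: 0 for upper 4x4 submatrix within the 8x4 submatrix, 1 for lower 4x4 submatrix
--     bits.append((row >> 2) & 1)
--
--     # Third bit: 0 for left 4x2 submatrix within the 4x4 submatrix, 1 for right 4x2 submatrix
--     bits.append((col >> 1) & 1)
--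
--     # Fourth bit: 0 for upper 2x2 submatrix within the 4x2 submatrix, 1 for lower 2x2 submatrix
--     bits.append((row >> 1) & 1)
--
--     # Fifth bit: 0 for left 2x1 submatrix within the 2x2 submatrix, 1 for right 2x1 submatrix
--     bits.append(col & 1)
--
--     # Sixth bit: 0 for upper 1x1 submatrix within the 2x1 submatrix, 1 for lower 1x1 submatrix
--     bits.append(row & 1)
--
--     # Pad with two zeros (since we have specified only 6 bits so far)
--     bits.append(0)
--     bits.append(0)
--
--     # Reverse the bit order
--     bits.reverse()
--
--     # Convert bits to a single byte integer
--     byte_value = 0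
--     for bit in bits:
--         byte_value = (byte_value << 1) | bit
--
--     return byte_value
-- ===== SOURCE B (Python) =====
-- def encode_position(row, col):
--     # Single closed-form bitwise expression: each selected bit of row/col is
--     # placed directly at its final position (bits 6-7 are always zero).
--     return (
--         ((row & 1) << 5)
--         | ((col & 1) << 4)
--         | (((row >> 1) & 1) << 3)
--         | (((col >> 1) & 1) << 2)
--         | (((row >> 2) & 1) << 1)
--         | ((col >> 2) & 1)
--     )
-- ===== Notes on version B (the rewrite author's own statement) =====
-- stated objective: simpler
-- what changed: Replaces the bit-list building, reversal and shift-accumulate loop with one closed-form bitwise OR expression that places each selected bit of row/col directly at its final position.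
import Mathlib
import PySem

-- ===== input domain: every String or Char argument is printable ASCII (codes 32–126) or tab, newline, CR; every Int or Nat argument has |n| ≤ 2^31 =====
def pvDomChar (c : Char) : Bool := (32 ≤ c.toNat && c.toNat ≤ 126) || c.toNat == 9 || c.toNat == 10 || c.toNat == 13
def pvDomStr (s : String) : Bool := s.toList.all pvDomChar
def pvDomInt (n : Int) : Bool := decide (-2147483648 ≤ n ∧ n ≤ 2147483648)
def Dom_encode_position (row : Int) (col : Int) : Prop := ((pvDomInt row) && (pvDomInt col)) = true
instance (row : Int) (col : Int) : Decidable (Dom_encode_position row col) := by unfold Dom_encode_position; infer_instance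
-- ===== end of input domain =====

-- B replaces A's bit-list building, reversal and shift-accumulate loop with one
-- closed-form bitwise OR expression (objective: simpler).

-- ===== PORT A =====
-- bits list built by the appends, then reversed, then folded with byte_value = (byte_value << 1) | bit
def encode_position (row : Int) (col : Int) : Int :=
  (([PySem.Int.band (col >>> (2 : Nat)) 1,
     PySem.Int.band (row >>> (2 : Nat)) 1,
     PySem.Int.band (col >>> (1 : Nat)) 1,
     PySem.Int.band (row >>> (1 : Nat)) 1,
     PySem.Int.band col 1,
     PySem.Int.band row 1,
     0, 0] : List Int).reverse).foldl
    (fun byte_value bit => PySem.Int.bor (byte_value <<< (1 : Nat)) bit) 0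

-- ===== PORT B =====
def encode_position_alt (row : Int) (col : Int) : Int :=
  PySem.Int.bor (PySem.Int.band row 1 <<< (5 : Nat))
    (PySem.Int.bor (PySem.Int.band col 1 <<< (4 : Nat))
      (PySem.Int.bor (PySem.Int.band (row >>> (1 : Nat)) 1 <<< (3 : Nat))
        (PySem.Int.bor (PySem.Int.band (col >>> (1 : Nat)) 1 <<< (2 : Nat))
          (PySem.Int.bor (PySem.Int.band (row >>> (2 : Nat)) 1 <<< (1 : Nat))
            (PySem.Int.band (col >>> (2 : Nat)) 1)))))

-- ===== PRECONDITION & SPEC =====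
def Spec_encode_position (row : Int) (col : Int) (out : Int) : Prop := out = encode_position_alt row col
instance (row : Int) (col : Int) (out : Int) : Decidable (Spec_encode_position row col out) := by unfold Spec_encode_position; infer_instance

-- ===== CLAIM (what is proved, stated in full; the proofs are below) =====
def Claim_equal_encode_position : Prop := ∀ (row : Int) (col : Int), Dom_encode_position row col → Spec_encode_position row col (encode_position row col)

-- ===== LEMMAS AND PROOFS =====

-- n >> k is floor division by 2^k (Python semantics, also on negatives)
theorem pv_sr_div (a : Int) (k : Nat) : a >>> k = a / 2 ^ k := by
  rcases a with m | m
  · show Int.ofNat (m >>> k) = _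
    rw [Nat.shiftRight_eq_div_pow]
    rw [Int.ofNat_eq_natCast, Int.natCast_ediv]
    norm_num
  · show Int.negSucc (m >>> k) = _
    rw [Nat.shiftRight_eq_div_pow]
    rw [Int.negSucc_ediv _ (by positivity)]
    rw [Int.negSucc_eq]
    have : ((m / 2 ^ k : Nat) : Int) = (m : Int).ediv ((2 : Int) ^ k) := by
      rw [Int.natCast_ediv]; norm_num; rfl
    omega

-- the three extracted bits only depend on x modulo 8
theorem pv_bit0 (x : Int) : PySem.Int.band x 1 = PySem.Int.band (x % 8) 1 := by
  rw [PySem.Int.band_one, PySem.Int.band_one,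
      PySem.Int.mod_eq_emod_of_pos (by norm_num), PySem.Int.mod_eq_emod_of_pos (by norm_num)]
  omega

theorem pv_bit1 (x : Int) :
    PySem.Int.band (x >>> (1 : Nat)) 1 = PySem.Int.band ((x % 8) >>> (1 : Nat)) 1 := by
  rw [PySem.Int.band_one, PySem.Int.band_one,
      PySem.Int.mod_eq_emod_of_pos (by norm_num), PySem.Int.mod_eq_emod_of_pos (by norm_num),
      pv_sr_div, pv_sr_div]
  norm_num
  omega

theorem pv_bit2 (x : Int) :
    PySem.Int.band (x >>> (2 : Nat)) 1 = PySem.Int.band ((x % 8) >>> (2 : Nat)) 1 := by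
  rw [PySem.Int.band_one, PySem.Int.band_one,
      PySem.Int.mod_eq_emod_of_pos (by norm_num), PySem.Int.mod_eq_emod_of_pos (by norm_num),
      pv_sr_div, pv_sr_div]
  norm_num
  omega

theorem pv_A_period (row col : Int) :
    encode_position row col = encode_position (row % 8) (col % 8) := by
  simp only [encode_position]
  rw [pv_bit0 row, pv_bit0 col, pv_bit1 row, pv_bit1 col, pv_bit2 row, pv_bit2 col]

theorem pv_B_period (row col : Int) :
    encode_position_alt row col = encode_position_alt (row % 8) (col % 8) := by
  simp only [encode_position_alt]
  rw [pv_bit0 row, pv_bit0 col, pv_bit1 row, pv_bit1 col, pv_bit2 row, pv_bit2 col]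

theorem pv_small (r c : Int) (hr0 : 0 ≤ r) (hr : r < 8) (hc0 : 0 ≤ c) (hc : c < 8) :
    encode_position r c = encode_position_alt r c := by
  interval_cases r <;> interval_cases c <;> decide

-- ===== VERDICT (by name: the statement is the Claim_ definition above) =====
theorem encode_position_spec : Claim_equal_encode_position := by
  intro row col _
  unfold Spec_encode_position
  rw [pv_A_period, pv_B_period]
  exact pv_small _ _ (Int.emod_nonneg _ (by norm_num)) (Int.emod_lt_of_pos _ (by norm_num))
    (Int.emod_nonneg _ (by norm_num)) (Int.emod_lt_of_pos _ (by norm_num))
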